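-- pv_equiv track=rewrite | github.com/SebJana/clash-royale-analytics | backend/clash_royale_api/api_client.py | check_tag_syntax
-- ===== SOURCE A (Python) =====
-- def check_tag_syntax(player_tag: str):
--     """
--     Checks wether the player tag starts with a '#' and has the correct length
--     and matches the Supercell alphabet.
--
--     Args:
--         player_tag (str): The player tag starting with '#' (e.g., "#YYRJQY28")
--
--     Returns:
--         bool: True if valid, False otherwise
--     """
--
--     ALPHABET = set("0289PYLQGRJCUV")  # Supercell-Tag-Alphabet
--
--     # Strip the tag
--     tag = player_tag.strip()
--
--     # Missing the starting code symbol
--     if not tag.startswith("#"):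
--         return False
--
--     core = tag[1:]  # Part without the leading '#'
--
--     # TODO check actual max or min length
--     # Invalid length
--     if len(core) < 4 or len(core) > 12:
--         return False
--
--     # Check if the tag without the '#' is only numbers and upper letters
--     if not all(ch in ALPHABET for ch in core):
--         return False
--
--     # Valid if all checks passed
--     return True
-- ===== SOURCE B (Python) =====
-- import re
--
-- _TAG_RE = re.compile(r'#[0289PYLQGRJCUV]{4,12}')
--
-- def check_tag_syntax(player_tag: str):
--     """Validate a Supercell player tag via one anchored regex fullmatch."""
--     return bool(_TAG_RE.fullmatch(player_tag.strip()))
-- ===== Notes on version B (the rewrite author's own statement) =====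
-- stated objective: idiomatic
-- what changed: Replaces the guard chain (startswith, slicing, length bounds, all(...) membership scan) with a single precompiled anchored regex fullmatch r'#[0289PYLQGRJCUV]{4,12}' on the stripped tag.
import Mathlib
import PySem

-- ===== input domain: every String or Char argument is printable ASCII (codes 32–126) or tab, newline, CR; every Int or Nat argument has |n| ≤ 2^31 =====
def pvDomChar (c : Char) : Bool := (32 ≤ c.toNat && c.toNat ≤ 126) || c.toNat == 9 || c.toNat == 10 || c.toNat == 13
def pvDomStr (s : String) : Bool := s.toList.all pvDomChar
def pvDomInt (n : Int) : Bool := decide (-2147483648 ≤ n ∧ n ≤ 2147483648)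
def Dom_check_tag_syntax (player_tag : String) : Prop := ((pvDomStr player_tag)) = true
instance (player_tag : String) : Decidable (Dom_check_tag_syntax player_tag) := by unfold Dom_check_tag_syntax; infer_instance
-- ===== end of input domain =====

-- B validates the tag with one anchored regex fullmatch instead of A's guard chain; same values everywhere (idiomatic rewrite).
-- ===== PORT A =====
def check_tag_syntax (player_tag : String) : Bool :=
  let ALPHABET : PySem.Set Char := PySem.Set.ofList "0289PYLQGRJCUV".toList
  let tag := PySem.Str.strip player_tag
  if !(PySem.Str.startswith tag "#") then false
  else
    let core := PySem.Str.slice tag (some 1) none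
    if PySem.Str.len core < 4 ∨ PySem.Str.len core > 12 then false
    else if !(core.toList.all (fun ch => ALPHABET.contains ch)) then false
    else true

-- ===== PORT B =====
-- Hand port of re.fullmatch(r'#[0289PYLQGRJCUV]{4,12}', tag): the pattern is anchored at both
-- ends, so a full match is exactly: first char '#', then 4–12 chars all from the class.
-- This is exact for this fixed pattern (no backtracking is observable for a single bounded class).
def check_tag_syntax_alt (player_tag : String) : Bool :=
  match (PySem.Str.strip player_tag).toList with
  | c :: core =>
      (c == '#') && decide (4 ≤ core.length) && decide (core.length ≤ 12)
        && core.all (fun ch => "0289PYLQGRJCUV".toList.contains ch)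
  | [] => false

-- ===== PRECONDITION & SPEC =====
def Spec_check_tag_syntax (player_tag : String) (out : Bool) : Prop := out = check_tag_syntax_alt player_tag
instance (player_tag : String) (out : Bool) : Decidable (Spec_check_tag_syntax player_tag out) := by unfold Spec_check_tag_syntax; infer_instance

-- ===== CLAIM (what is proved, stated in full; the proofs are below) =====
def Claim_equal_check_tag_syntax : Prop := ∀ (player_tag : String), Dom_check_tag_syntax player_tag → Spec_check_tag_syntax player_tag (check_tag_syntax player_tag)

-- ===== LEMMAS AND PROOFS =====
lemma contains_ofList_char (xs : List Char) (c : Char) :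
    PySem.Set.contains (PySem.Set.ofList xs) c = xs.contains c := by
  rw [Bool.eq_iff_iff]
  simp only [PySem.Set.contains, List.contains_iff_mem]
  exact PySem.Set.mem_ofList xs c

theorem check_tag_syntax_main (s : String) :
    check_tag_syntax s = check_tag_syntax_alt s := by
  unfold check_tag_syntax check_tag_syntax_alt
  cases h : (PySem.Str.strip s).toList with
  | nil =>
      simp [PySem.Str.startswith_eq, h, PySem.Chars.startswith, List.isPrefixOf]
  | cons c core =>
      rcases eq_or_ne c '#' with rfl | hc
      · have hs : PySem.Str.startswith (PySem.Str.strip s) "#" = true := by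
          simp [PySem.Str.startswith_eq, h, PySem.Chars.startswith]
        have hslice : (PySem.Str.slice (PySem.Str.strip s) (some 1) none).toList = core := by
          rw [PySem.Str.toList_slice, h]
          exact PySem.List.slice_from_one _
        simp only [hs, Bool.not_true, Bool.false_eq_true, if_false, PySem.Str.len_eq, hslice,
                   contains_ofList_char]
        by_cases h4 : (4:Int) ≤ (core.length : Int) ∧ (core.length : Int) ≤ 12
        · have h4' : ¬ ((core.length : Int) < 4 ∨ (core.length : Int) > 12) := by omega
          have e1 : decide (4 ≤ core.length) = true := by
            simp; omega
          have e2 : decide (core.length ≤ 12) = true := by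
            simp; omega
          simp only [h4', if_false, e1, e2, beq_self_eq_true, Bool.true_and, Bool.and_true]
          cases hb : core.all (fun ch => List.contains "0289PYLQGRJCUV".toList ch) <;> simp
        · have h4' : (core.length : Int) < 4 ∨ (core.length : Int) > 12 := by omega
          have e : ¬ (4 ≤ core.length ∧ core.length ≤ 12) := by omega
          simp only [h4', if_true]
          rcases not_and_or.mp e with he | he <;> simp [he]
      · have h' : PySem.Chars.strip s.toList = c :: core := by
          rw [← PySem.Str.toList_strip]; exact h
        have hpre : PySem.Chars.startswith (c :: core) ['#'] = false := by
          simp [PySem.Chars.startswith, List.isPrefixOf, Ne.symm hc]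
        have hb : (c == '#') = false := by simp [hc]
        simp [h', hpre, hb]

-- ===== VERDICT (by name: the statement is the Claim_ definition above) =====
theorem check_tag_syntax_spec : Claim_equal_check_tag_syntax := by
  intro s _
  unfold Spec_check_tag_syntax
  exact check_tag_syntax_main s
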